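-- pv_equiv track=rewrite | github.com/Fondamenti18/fondamenti-di-programmazione | students/1810218/homework02/program03.py | compatibili
-- ===== SOURCE A (Python) =====
-- def compatibili(codice,parola):
--     parola=parola.replace('\n','')
--     if len(codice)!=len(parola):
--         return False
--     d={}
--     pos=0
--     while pos<len(parola):
--         if parola[pos] not in d.keys():
--
--             d.update({parola[pos]:codice[pos]})
--         else:
--             if codice[pos]==d[parola[pos]]:
--                 pass
--             else:
--                 return False
--         pos+=1
--
--     l=list(d.values())
--     a=set(d.values())
--     l1=[]
--     for x in a:
--         if l.count(x)==1:
--             l1.append(1)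
--     if len(l1)==len(l):
--         return True
--     else:
--         return False
-- ===== SOURCE B (Python) =====
-- def compatibili(codice, parola):
--     parola = parola.replace('\n', '')
--     if len(codice) != len(parola):
--         return False
--     fwd = {}
--     rev = {}
--     for c, p in zip(codice, parola):
--         if p in fwd:
--             if fwd[p] != c:
--                 return False
--         elif c in rev:
--             return False
--         else:
--             fwd[p] = c
--             rev[c] = p
--     return True
-- ===== Notes on version B (the rewrite author's own statement) =====
-- stated objective: faster
-- what changed: B replaces A's build-then-count-values injectivity check (list(d.values()), set, a count() scan per distinct value) with a single zip pass maintaining a forward and a reverse map, failing fast on any conflict.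
import Mathlib
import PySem

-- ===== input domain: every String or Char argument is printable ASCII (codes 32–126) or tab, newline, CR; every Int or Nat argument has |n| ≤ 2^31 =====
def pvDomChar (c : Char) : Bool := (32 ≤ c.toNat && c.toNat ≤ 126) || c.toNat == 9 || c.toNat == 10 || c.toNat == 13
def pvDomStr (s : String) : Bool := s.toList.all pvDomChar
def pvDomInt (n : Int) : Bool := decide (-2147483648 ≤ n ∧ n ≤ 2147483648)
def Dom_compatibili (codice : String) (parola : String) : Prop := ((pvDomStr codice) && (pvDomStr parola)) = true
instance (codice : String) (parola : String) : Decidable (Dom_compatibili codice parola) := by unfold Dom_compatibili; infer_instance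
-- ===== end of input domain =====

-- B replaces A's build-then-count-values injectivity check with a single zip pass keeping a
-- forward and a reverse map: same results, without A's per-distinct-value count() scan.

-- ===== PORT A =====
-- A's while loop: build d (parola-char -> codice-char), early-False on a conflicting forward mapping.
def aLoop (d : PySem.Dict Char Char) : List Char → List Char → Option (PySem.Dict Char Char)
  | [], _ => some d
  | _ :: _, [] => none          -- unreachable: the length guard makes both lists equally long
  | p :: ps, c :: cs =>
      match d.get? p with
      | none => aLoop (d.insert p c) ps cs
      | some v => if c = v then aLoop d ps cs else none

-- A's tail: l = values, a = set(values), count each distinct value, compare lengths.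
def aCheck (d : PySem.Dict Char Char) : Bool :=
  let l := d.values
  let a := PySem.Set.ofList l
  let l1 := a.foldl (fun acc x => if l.count x == 1 then acc ++ [(1 : Int)] else acc) ([] : List Int)
  if l1.length == l.length then true else false

def compatibili (codice : String) (parola : String) : Bool :=
  let pl := PySem.Chars.replace parola.toList ['\n'] []
  let cl := codice.toList
  if cl.length ≠ pl.length then false
  else
    match aLoop PySem.Dict.empty pl cl with
    | none => false
    | some d => aCheck d

-- ===== PORT B =====
-- B's single pass over zip(codice, parola) with forward and reverse maps.
def bLoop (fwd : PySem.Dict Char Char) (rev : PySem.Dict Char Char) : List (Char × Char) → Bool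
  | [] => true
  | (c, p) :: rest =>
      if fwd.contains p then
        if fwd.get? p ≠ some c then false else bLoop fwd rev rest
      else if rev.contains c then false
      else bLoop (fwd.insert p c) (rev.insert c p) rest

def compatibili_alt (codice : String) (parola : String) : Bool :=
  let pl := PySem.Chars.replace parola.toList ['\n'] []
  let cl := codice.toList
  if cl.length ≠ pl.length then false
  else bLoop PySem.Dict.empty PySem.Dict.empty (cl.zip pl)

-- ===== PRECONDITION & SPEC =====
def Spec_compatibili (codice : String) (parola : String) (out : Bool) : Prop := out = compatibili_alt codice parola
instance (codice : String) (parola : String) (out : Bool) : Decidable (Spec_compatibili codice parola out) := by unfold Spec_compatibili; infer_instance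

-- ===== CLAIM (what is proved, stated in full; the proofs are below) =====
def Claim_equal_compatibili : Prop := ∀ (codice : String) (parola : String), Dom_compatibili codice parola → Spec_compatibili codice parola (compatibili codice parola)

-- ===== LEMMAS AND PROOFS =====

-- A's value-counting tail is exactly "the values are pairwise distinct".
lemma sub_ofList {α : Type} [DecidableEq α] (l : List α) : (PySem.Set.ofList l).Sublist l := by
  induction l with
  | nil => simp [PySem.Set.ofList_nil]
  | cons x xs ih =>
      rw [PySem.Set.ofList_cons]
      refine List.Sublist.cons₂ x (List.Sublist.trans ?_ ih)
      simp only [PySem.Set.discard]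
      exact List.filter_sublist

lemma aCheck_eq_nodup (d : PySem.Dict Char Char) : aCheck d = decide d.values.Nodup := by
  simp only [aCheck]
  rw [PySem.List.foldl_append_if]
  set l := d.values with hl
  simp only [List.nil_append, List.length_map]
  by_cases hn : l.Nodup
  · rw [PySem.Set.ofList_eq_self_of_nodup l hn]
    have hf : l.filter (fun x => l.count x == 1) = l := by
      rw [List.filter_eq_self]
      intro a ha
      simp [List.count_eq_one_of_mem hn ha]
    rw [hf]
    simp [hn]
  · have hne : ((PySem.Set.ofList l).filter (fun x => l.count x == 1)).length ≠ l.length := by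
      intro he
      have h1 : ((PySem.Set.ofList l).filter (fun x => l.count x == 1)).length ≤ (PySem.Set.ofList l).length :=
        List.length_filter_le _ _
      have h2 : (PySem.Set.ofList l).length ≤ l.length := PySem.Set.length_ofList_le l
      have h3 : (PySem.Set.ofList l).length = l.length := by omega
      have h4 : PySem.Set.ofList l = l := (sub_ofList l).eq_of_length h3
      exact hn (h4 ▸ PySem.Set.nodup_ofList l)
    simp [hne, hn]

-- equation lemmas for aLoop's step, by the value of d.get? p
lemma aLoop_cons_some (d : PySem.Dict Char Char) (p : Char) (ps : List Char) (c : Char)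
    (cs : List Char) (v : Char) (hg : d.get? p = some v) :
    aLoop d (p :: ps) (c :: cs) = if c = v then aLoop d ps cs else none := by
  simp only [aLoop, hg]

lemma aLoop_cons_none (d : PySem.Dict Char Char) (p : Char) (ps : List Char) (c : Char)
    (cs : List Char) (hg : d.get? p = none) :
    aLoop d (p :: ps) (c :: cs) = aLoop (d.insert p c) ps cs := by
  simp only [aLoop, hg]

-- aLoop only ever inserts fresh keys, so a duplicated value never goes away: the run ends False.
lemma values_insert_fresh (d : PySem.Dict Char Char) (p c : Char) (h : d.contains p = false) :
    (d.insert p c).values = d.values ++ [c] := by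
  simp only [PySem.Dict.values, PySem.Dict.items_insert_of_not_contains d c h, List.map_append,
    List.map_cons, List.map_nil]

lemma aLoop_dup_false (ps : List Char) : ∀ (cs : List Char) (d : PySem.Dict Char Char),
    ¬ d.values.Nodup →
    (match aLoop d ps cs with | none => false | some d' => aCheck d') = false := by
  induction ps with
  | nil =>
      intro cs d h
      simp [aLoop, aCheck_eq_nodup, h]
  | cons p pt ih =>
      intro cs d h
      cases cs with
      | nil => simp [aLoop]
      | cons c ct =>
          cases hg : d.get? p with
          | none =>
              have hc : d.contains p = false := by
                rw [PySem.Dict.contains_eq_isSome_get?, hg]; rfl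
              rw [aLoop_cons_none d p pt c ct hg]
              refine ih ct (d.insert p c) ?_
              rw [values_insert_fresh d p c hc]
              intro hnd
              exact h (hnd.sublist (List.sublist_append_left _ _))
          | some v =>
              rw [aLoop_cons_some d p pt c ct v hg]
              by_cases hcv : c = v
              · rw [if_pos hcv]
                exact ih ct d h
              · rw [if_neg hcv]

lemma values_nodup_of_inv (d rev : PySem.Dict Char Char) (hk : d.keys.Nodup)
    (hinv : ∀ p c, d.get? p = some c ↔ rev.get? c = some p) : d.values.Nodup := by
  rw [PySem.Dict.values_eq_map_keys d hk ' ']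
  refine List.Nodup.map_on ?_ hk
  intro k1 h1 k2 h2 he
  have g1 : d.get? k1 = some (d.getD k1 ' ') := by
    have hs : (d.get? k1).isSome := by
      rw [← PySem.Dict.contains_eq_isSome_get?]
      exact (PySem.Dict.contains_iff_mem_keys d k1).2 h1
    obtain ⟨v, hv⟩ := Option.isSome_iff_exists.1 hs
    rw [hv, PySem.Dict.getD_of_get?_eq_some d ' ' hv]
  have g2 : d.get? k2 = some (d.getD k2 ' ') := by
    have hs : (d.get? k2).isSome := by
      rw [← PySem.Dict.contains_eq_isSome_get?]
      exact (PySem.Dict.contains_iff_mem_keys d k2).2 h2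
    obtain ⟨v, hv⟩ := Option.isSome_iff_exists.1 hs
    rw [hv, PySem.Dict.getD_of_get?_eq_some d ' ' hv]
  have r1 := (hinv k1 (d.getD k1 ' ')).1 g1
  have r2 := (hinv k2 (d.getD k2 ' ')).1 g2
  rw [he] at r1
  rw [r1] at r2
  exact Option.some_injective _ r2

-- the invariant: rev is the exact inverse of d
lemma main_lemma (ps : List Char) : ∀ (cs : List Char) (d rev : PySem.Dict Char Char),
    cs.length = ps.length → d.keys.Nodup → rev.keys.Nodup →
    (∀ p c, d.get? p = some c ↔ rev.get? c = some p) →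
    bLoop d rev (cs.zip ps) = (match aLoop d ps cs with | none => false | some d' => aCheck d') := by
  induction ps with
  | nil =>
      intro cs d rev hlen hdk hrk hinv
      have hcs : cs = [] := by
        cases cs with
        | nil => rfl
        | cons a t => simp at hlen
      subst hcs
      simp [bLoop, aLoop, aCheck_eq_nodup, values_nodup_of_inv d rev hdk hinv]
  | cons p pt ih =>
      intro cs d rev hlen hdk hrk hinv
      cases cs with
      | nil => simp at hlen
      | cons c ct =>
          simp only [List.length_cons, Nat.add_right_cancel_iff] at hlen
          cases hg : d.get? p with
          | some v =>
              have hc : d.contains p = true := by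
                rw [PySem.Dict.contains_eq_isSome_get?, hg]; rfl
              rw [List.zip_cons_cons, aLoop_cons_some d p pt c ct v hg]
              simp only [bLoop, hc, hg]
              rw [if_pos trivial]
              by_cases hcv : c = v
              · subst hcv
                rw [if_neg (by simp), if_pos rfl]
                exact ih ct d rev hlen hdk hrk hinv
              · have hne : some v ≠ some c := fun h => hcv ((Option.some_injective _ h).symm)
                rw [if_pos hne, if_neg hcv]
          | none =>
              have hc : d.contains p = false := by
                rw [PySem.Dict.contains_eq_isSome_get?, hg]; rfl
              rw [List.zip_cons_cons, aLoop_cons_none d p pt c ct hg]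
              simp only [bLoop, hc]
              rw [if_neg (by simp)]
              cases hrc : rev.contains c with
              | true =>
                  rw [if_pos rfl]
                  have hq : ∃ q, rev.get? c = some q := by
                    rw [PySem.Dict.contains_eq_isSome_get?] at hrc
                    exact Option.isSome_iff_exists.1 hrc
                  obtain ⟨q, hq⟩ := hq
                  have hdq : d.get? q = some c := (hinv q c).2 hq
                  have hcv : c ∈ d.values := by
                    have hm := PySem.Dict.mem_items_of_get?_eq_some d hdq
                    simp only [PySem.Dict.values]
                    exact List.mem_map.2 ⟨(q, c), hm, rfl⟩
                  refine (aLoop_dup_false pt ct (d.insert p c) ?_).symm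
                  rw [values_insert_fresh d p c hc]
                  simp [List.nodup_append, hcv]
              | false =>
                  rw [if_neg (by simp)]
                  have hrn : rev.get? c = none := by
                    have := PySem.Dict.contains_eq_isSome_get? rev c
                    rw [hrc] at this
                    cases hx : rev.get? c with
                    | none => rfl
                    | some q => rw [hx] at this; exact absurd this.symm (by simp)
                  refine ih ct (d.insert p c) (rev.insert c p) hlen
                    (PySem.Dict.nodup_keys_insert d p c hdk) (PySem.Dict.nodup_keys_insert rev c p hrk) ?_
                  intro p' c'
                  rw [PySem.Dict.get?_insert, PySem.Dict.get?_insert]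
                  by_cases hp : p' = p
                  · subst hp
                    by_cases hcc : c' = c
                    · subst hcc; simp
                    · rw [if_pos rfl, if_neg hcc]
                      constructor
                      · intro he
                        exact absurd ((Option.some_injective _ he).symm) hcc
                      · intro he
                        have := (hinv p' c').2 he
                        rw [hg] at this
                        exact absurd this (by simp)
                  · by_cases hcc : c' = c
                    · subst hcc
                      rw [if_neg hp, if_pos rfl]
                      constructor
                      · intro he
                        have := (hinv p' c').1 he
                        rw [hrn] at this
                        exact absurd this (by simp)
                      · intro he
                        exact absurd ((Option.some_injective _ he).symm) hp
                    · rw [if_neg hp, if_neg hcc]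
                      exact hinv p' c'

-- ===== VERDICT (by name: the statement is the Claim_ definition above) =====
theorem compatibili_spec : Claim_equal_compatibili := by
  intro codice parola _
  unfold Spec_compatibili compatibili compatibili_alt
  set pl := PySem.Chars.replace parola.toList ['\n'] [] with hpl
  set cl := codice.toList with hcl
  by_cases h : cl.length = pl.length
  · simp only [h, ne_eq, not_true_eq_false, if_false]
    rw [main_lemma pl cl PySem.Dict.empty PySem.Dict.empty h
      PySem.Dict.nodup_keys_empty PySem.Dict.nodup_keys_empty
      (by intro p c; simp [PySem.Dict.get?_empty])]
  · simp [h]
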